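-- pv_equiv track=rewrite | github.com/shabs2020/control-traffic-T-SDN | Test_impl.py | _find_available_slots
-- ===== SOURCE A (Python) =====
-- def _find_available_slots(slots,no_of_slots):
--     cand_slots=[]
--     ranges = sum((list(t) for t in zip(slots, slots[1:]) if t[0] + 1 != t[1]), [])
--     iranges = iter(slots[0:1] + ranges + slots[-1:])
--     if iranges:
--         for n in iranges:
--             begin_slot = n
--             end_slot=next(iranges)
--             req_slots = (begin_slot + no_of_slots)-1
--             if req_slots<=end_slot:
--                 cand_slots.append([begin_slot,req_slots])
--
--         return cand_slots
-- ===== SOURCE B (Python) =====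
-- def _find_available_slots(slots, no_of_slots):
--     # Divide and conquer: recursively compute the (start, end) run decomposition
--     # of each half and merge, fusing the halves' boundary runs when consecutive.
--     def runs(seg):
--         if len(seg) == 1:
--             return [(seg[0], seg[0])]
--         mid = len(seg) // 2
--         left, right = runs(seg[:mid]), runs(seg[mid:])
--         (ls, le), (rs, re) = left[-1], right[0]
--         if le + 1 == rs:
--             return left[:-1] + [(ls, re)] + right[1:]
--         return left + right
--     if not slots:
--         return []
--     return [[s, s + no_of_slots - 1]
--             for s, e in runs(slots) if s + no_of_slots - 1 <= e]
-- ===== Notes on version B (the rewrite author's own statement) =====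
-- stated objective: alternative
-- what changed: Replaces A's gap-pair list built by sum((...), []) (repeated list concatenation) consumed two-at-a-time through a shared iterator with a divide-and-conquer run decomposition: split the list in half, recursively compute each half's (start,end) runs and merge them, fusing the two boundary runs when consecutive, then emit a candidate per run that fits.
import Mathlib
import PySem

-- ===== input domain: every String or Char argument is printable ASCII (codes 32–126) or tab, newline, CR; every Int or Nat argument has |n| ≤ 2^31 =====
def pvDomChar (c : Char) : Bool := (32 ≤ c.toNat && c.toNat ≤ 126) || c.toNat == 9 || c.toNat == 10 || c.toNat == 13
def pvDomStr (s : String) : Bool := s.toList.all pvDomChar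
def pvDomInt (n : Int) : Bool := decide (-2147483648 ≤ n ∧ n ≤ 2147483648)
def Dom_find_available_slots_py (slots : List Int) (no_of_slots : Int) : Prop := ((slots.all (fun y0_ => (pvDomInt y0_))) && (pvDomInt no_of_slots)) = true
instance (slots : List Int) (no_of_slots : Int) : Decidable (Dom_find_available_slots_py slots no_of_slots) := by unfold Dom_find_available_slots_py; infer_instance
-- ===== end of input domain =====

-- B replaces A's sum(...,[]) gap-pair flatten + paired-iterator walk by a divide-and-conquer
-- run decomposition (split in half, merge the halves' runs, fusing consecutive boundary runs).

-- ===== PORT A =====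
-- the 'for n in iranges: … next(iranges)' loop: consumes the boundary list two at a time.
-- (the '| [_]' branch is unreachable: the boundary list always has even length)
def pvLoopA (no_of_slots : Int) (cand : List (List Int)) : List Int → List (List Int)
  | [] => cand
  | [_] => cand
  | b :: e :: rest =>
      let req := (b + no_of_slots) - 1
      pvLoopA no_of_slots (if req ≤ e then cand ++ [[b, req]] else cand) rest

def find_available_slots_py (slots : List Int) (no_of_slots : Int) : List (List Int) :=
  -- ranges = sum((list(t) for t in zip(slots, slots[1:]) if t[0] + 1 != t[1]), [])
  let ranges :=
    (((slots.zip (PySem.List.slice slots (some 1) none)).filter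
        (fun t => t.1 + 1 ≠ t.2)).map (fun t => [t.1, t.2])).foldl (· ++ ·) []
  -- iranges = iter(slots[0:1] + ranges + slots[-1:]); paired for-loop
  pvLoopA no_of_slots []
    (PySem.List.slice slots (some 0) (some 1) ++ ranges ++ PySem.List.slice slots (some (-1)) none)

-- ===== PORT B =====
-- merge step of B's 'runs': fuse the halves' boundary runs when consecutive
def pvMerge (L R : List (Int × Int)) : List (Int × Int) :=
  match L.getLast?, R with
  | some (ls, le), (rs, re) :: rt =>
      if le + 1 = rs then L.dropLast ++ (ls, re) :: rt else L ++ R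
  | _, _ => L ++ R

-- B's 'runs(seg)': divide and conquer on the segment
def pvRunsD : List Int → List (Int × Int)
  | [] => []
  | [x] => [(x, x)]
  | x :: y :: rest =>
      pvMerge (pvRunsD ((x :: y :: rest).take ((x :: y :: rest).length / 2)))
              (pvRunsD ((x :: y :: rest).drop ((x :: y :: rest).length / 2)))
termination_by l => l.length
decreasing_by
  · simp; omega
  · simp; omega

def find_available_slots_py_alt (slots : List Int) (no_of_slots : Int) : List (List Int) :=
  match slots with
  | [] => []
  | s :: rest =>
      ((pvRunsD (s :: rest)).filter (fun p => p.1 + no_of_slots - 1 ≤ p.2)).map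
        (fun p => [p.1, p.1 + no_of_slots - 1])

-- ===== PRECONDITION & SPEC =====
def Spec_find_available_slots_py (slots : List Int) (no_of_slots : Int) (out : List (List Int)) : Prop := out = find_available_slots_py_alt slots no_of_slots
instance (slots : List Int) (no_of_slots : Int) (out : List (List Int)) : Decidable (Spec_find_available_slots_py slots no_of_slots out) := by unfold Spec_find_available_slots_py; infer_instance

-- ===== CLAIM (what is proved, stated in full; the proofs are below) =====
def Claim_equal_find_available_slots_py : Prop := ∀ (slots : List Int) (no_of_slots : Int), Dom_find_available_slots_py slots no_of_slots → Spec_find_available_slots_py slots no_of_slots (find_available_slots_py slots no_of_slots)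

-- ===== LEMMAS AND PROOFS =====

-- reference left-to-right run scan, used only as a proof intermediary
def pvRunsB (start last : Int) : List Int → List (Int × Int)
  | [] => [(start, last)]
  | x :: xs => if last + 1 ≠ x then (start, last) :: pvRunsB x x xs else pvRunsB start x xs

def pvRuns : List Int → List (Int × Int)
  | [] => []
  | y :: yt => pvRunsB y y yt

lemma pvRunsB_ne_nil (r : List Int) : ∀ (start last : Int), pvRunsB start last r ≠ [] := by
  induction r with
  | nil => intro s l; simp [pvRunsB]
  | cons x xs ih =>
      intro s l
      by_cases h : l + 1 ≠ x <;> simp [pvRunsB, h, ih]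

-- the start argument only affects the first pair's first component
lemma pvRunsB_head_tail (r : List Int) : ∀ (l a b : Int),
    pvRunsB a l r = (a, (pvRunsB b l r).headI.2) :: (pvRunsB b l r).tail := by
  induction r with
  | nil => intro l a b; simp [pvRunsB]
  | cons x xs ih =>
      intro l a b
      by_cases h : l + 1 ≠ x
      · simp [pvRunsB, h]
      · rw [not_not] at h
        simp only [pvRunsB, h, ne_eq, not_true_eq_false, if_false]
        exact ih x a b

lemma pvMerge_cons (p : Int × Int) (L R : List (Int × Int)) (hL : L ≠ []) (hR : R ≠ []) :
    pvMerge (p :: L) R = p :: pvMerge L R := by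
  obtain ⟨r0, R', rfl⟩ := List.exists_cons_of_ne_nil hR
  obtain ⟨rs, re⟩ := r0
  obtain ⟨q, L'', rfl⟩ := List.exists_cons_of_ne_nil hL
  have hlast : (q :: L'').getLast? = some ((q :: L'').getLast (by simp)) :=
    List.getLast?_eq_some_getLast (by simp)
  have hlast' : (p :: q :: L'').getLast? = some ((q :: L'').getLast (by simp)) := by
    rw [List.getLast?_cons_cons]; exact hlast
  rcases hq : (q :: L'').getLast (by simp) with ⟨ls, le⟩
  unfold pvMerge
  rw [hlast, hlast', hq]
  by_cases h : le + 1 = rs <;> simp [h]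

lemma pvRunsB_append (rest : List Int) : ∀ (ys : List Int) (start last : Int), ys ≠ [] →
    pvRunsB start last (rest ++ ys) = pvMerge (pvRunsB start last rest) (pvRuns ys) := by
  induction rest with
  | nil =>
      intro ys start last hys
      obtain ⟨y, yt, rfl⟩ := List.exists_cons_of_ne_nil hys
      have hshape : pvRunsB y y yt = (y, (pvRunsB y y yt).headI.2) :: (pvRunsB y y yt).tail :=
        pvRunsB_head_tail yt y y y
      by_cases h : last + 1 ≠ y
      · simp only [List.nil_append, pvRunsB, if_pos h, pvRuns]
        rw [hshape]
        unfold pvMerge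
        simp [h]
      · rw [not_not] at h
        simp only [List.nil_append, pvRunsB, h, ne_eq, not_true_eq_false, if_false, pvRuns]
        rw [pvRunsB_head_tail yt y start y, hshape]
        unfold pvMerge
        simp [h]
  | cons x rt ih =>
      intro ys start last hys
      have hR : pvRuns ys ≠ [] := by
        obtain ⟨y, yt, rfl⟩ := List.exists_cons_of_ne_nil hys
        simp [pvRuns, pvRunsB_ne_nil]
      by_cases h : last + 1 ≠ x
      · simp only [List.cons_append, pvRunsB, if_pos h]
        rw [ih ys x x hys, ← pvMerge_cons _ _ _ (pvRunsB_ne_nil _ _ _) hR]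
      · rw [not_not] at h
        simp only [List.cons_append, pvRunsB, h, ne_eq, not_true_eq_false, if_false]
        rw [ih ys start x hys]

lemma pvRuns_append (xs ys : List Int) (hx : xs ≠ []) (hy : ys ≠ []) :
    pvRuns (xs ++ ys) = pvMerge (pvRuns xs) (pvRuns ys) := by
  obtain ⟨a, at_, rfl⟩ := List.exists_cons_of_ne_nil hx
  simp only [List.cons_append, pvRuns]
  exact pvRunsB_append at_ ys a a hy

lemma pvRunsD_eq (l : List Int) : pvRunsD l = pvRuns l := by
  induction l using pvRunsD.induct with
  | case1 => rw [pvRunsD]; rfl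
  | case2 x => rw [pvRunsD]; simp [pvRuns, pvRunsB]
  | case3 x y rest ih1 ih2 =>
      rw [pvRunsD]
      rw [ih1, ih2]
      have h1 : (x :: y :: rest).take ((x :: y :: rest).length / 2) ≠ [] := by
        rw [← List.length_pos_iff, List.length_take]
        simp
      have h2 : (x :: y :: rest).drop ((x :: y :: rest).length / 2) ≠ [] := by
        rw [← List.length_pos_iff, List.length_drop]
        simp
        omega
      rw [← pvRuns_append _ _ h1 h2, List.take_append_drop]

-- ===== connect A's boundary-pair walk to the run scan =====

-- interleave runs back into A's boundary list
def pvFlatPairs (rs : List (Int × Int)) : List Int := rs.flatMap (fun p => [p.1, p.2])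

-- A's gap-boundary list, as a flatMap
def pvRz (l : List Int) : List Int :=
  ((l.zip (l.drop 1)).filter (fun t => t.1 + 1 ≠ t.2)).flatMap (fun t => [t.1, t.2])

lemma pvKey (rest : List Int) : ∀ last start : Int,
    pvFlatPairs (pvRunsB start last rest) =
      start :: (pvRz (last :: rest) ++ (last :: rest).drop rest.length) := by
  induction rest with
  | nil => intro last start; simp [pvFlatPairs, pvRunsB, pvRz]
  | cons x r ih =>
      intro last start
      by_cases h : last + 1 ≠ x
      · simp [pvRunsB, h, pvFlatPairs, pvRz, List.zip] at ih ⊢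
        simpa [pvFlatPairs, pvRz] using ih x x
      · simp [pvRunsB, h, pvFlatPairs, pvRz, List.zip] at ih ⊢
        simpa [pvFlatPairs, pvRz] using ih x start

lemma pvPairsLoop (n : Int) : ∀ (rs : List (Int × Int)) (cand : List (List Int)),
    pvLoopA n cand (pvFlatPairs rs) =
      cand ++ (rs.filter (fun p => p.1 + n - 1 ≤ p.2)).map (fun p => [p.1, p.1 + n - 1]) := by
  intro rs
  induction rs with
  | nil => intro cand; simp [pvFlatPairs, pvLoopA]
  | cons p r ih =>
      intro cand
      have hf : pvFlatPairs (p :: r) = p.1 :: p.2 :: pvFlatPairs r := by simp [pvFlatPairs]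
      rw [hf]
      simp only [pvLoopA]
      rw [ih]
      by_cases h : p.1 + n - 1 ≤ p.2
      · rw [if_pos h, List.filter_cons_of_pos (by simpa using h)]
        simp [List.append_assoc]
      · rw [if_neg h, List.filter_cons_of_neg (by simpa using h)]

lemma pvSliceLast (s : Int) (rest : List Int) :
    PySem.List.slice (s :: rest) (some (-1)) none = (s :: rest).drop rest.length := by
  rw [PySem.List.slice_some_none]
  congr 1
  simp [PySem.List.clampIdx]

lemma pvSliceHead (s : Int) (rest : List Int) :
    PySem.List.slice (s :: rest) (some 0) (some 1) = [s] := by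
  simp [PySem.List.slice, PySem.List.clampIdx]

lemma pvSliceTail (l : List Int) :
    PySem.List.slice l (some 1) none = l.drop 1 := by
  cases l with
  | nil => rfl
  | cons x xs => simp [PySem.List.slice_some_none, PySem.List.clampIdx]

-- ===== VERDICT (by name: the statement is the Claim_ definition above) =====
theorem find_available_slots_py_spec : Claim_equal_find_available_slots_py := by
  intro slots n _
  unfold Spec_find_available_slots_py
  cases slots with
  | nil => rfl
  | cons s rest =>
      show find_available_slots_py (s :: rest) n = _
      unfold find_available_slots_py find_available_slots_py_alt
      rw [pvSliceHead, pvSliceLast, pvSliceTail]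
      have hflat : (((( s :: rest).zip ((s :: rest).drop 1)).filter
          (fun t => t.1 + 1 ≠ t.2)).map (fun t => [t.1, t.2])).foldl (· ++ ·) [] = pvRz (s :: rest) := by
        rw [List.foldl_map, PySem.List.foldl_append_eq_flatMap]
        simp [pvRz]
      simp only [hflat]
      have h2 : [s] ++ pvRz (s :: rest) ++ (s :: rest).drop rest.length
          = pvFlatPairs (pvRunsB s s rest) := by
        rw [pvKey rest s s]; simp
      rw [h2, pvPairsLoop, pvRunsD_eq]
      simp [pvRuns]
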